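-- pv_equiv track=rewrite | github.com/lsiepman/AdventOfCode2016 | Day01.py | FindDirection
-- ===== SOURCE A (Python) =====
-- def FindDirection(data):
--     d = "N"
--     direction = []
--     for i in data["turn"]:
--
--         if d == "N":
--             if i == "R":
--                 d = "E"
--             else: d = "W"
--
--         elif d == "E":
--             if i == "R":
--                 d = "S"
--             else: d = "N"
--
--         elif d == "S":
--            if i == "R":
--                d = "W"
--            else: d = "E"
--
--         elif d == "W":
--             if i == "R":
--                 d = "N"
--             else: d = "S"
--
--         direction.append(d)
--
--     data["direction"] = direction
--
--     return data
-- ===== SOURCE B (Python) =====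
-- def FindDirection(data):
--     # Stage 1: cumulative signed turn count (R=+1, anything else=-1), no direction state.
--     total = 0
--     prefix = []
--     for t in data["turn"]:
--         total += 1 if t == "R" else -1
--         prefix.append(total)
--     # Stage 2: decode each net rotation into a compass letter.
--     data["direction"] = ["NESW"[p % 4] for p in prefix]
--     return data
-- ===== Notes on version B (the rewrite author's own statement) =====
-- stated objective: alternative
-- what changed: Replaces the single-pass 4x2 letter state machine by a staged computation: first a pass producing cumulative signed turn counts (no direction state at all), then a decoding pass mapping each net rotation mod 4 to its compass letter.
import Mathlib
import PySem

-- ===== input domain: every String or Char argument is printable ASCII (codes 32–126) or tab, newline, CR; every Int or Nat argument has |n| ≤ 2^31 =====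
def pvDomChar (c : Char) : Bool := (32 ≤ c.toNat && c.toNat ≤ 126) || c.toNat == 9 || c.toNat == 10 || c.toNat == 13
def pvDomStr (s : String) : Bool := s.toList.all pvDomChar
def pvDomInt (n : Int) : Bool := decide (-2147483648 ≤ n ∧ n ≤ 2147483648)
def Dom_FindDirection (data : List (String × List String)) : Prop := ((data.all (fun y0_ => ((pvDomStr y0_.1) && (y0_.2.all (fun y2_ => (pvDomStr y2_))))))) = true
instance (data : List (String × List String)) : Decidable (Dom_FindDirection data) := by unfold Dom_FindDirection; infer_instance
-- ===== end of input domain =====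

-- B replaces A's letter state machine by two stages: a cumulative signed turn count,
-- then a mod-4 decoding pass (objective: alternative). Both A and B mutate the input
-- dict ("direction" key) and return it; the equivalence is about the returned value.

-- ===== PORT A =====
-- dict assignment data["direction"] = v on the association list: overwrite the first
-- "direction" entry in place, otherwise append (Python dict insertion-order semantics).
def pySetDirection (data : List (String × List String)) (v : List String) : List (String × List String) :=
  match data with
  | [] => [("direction", v)]
  | (k, x) :: rest => if k == "direction" then (k, v) :: rest else (k, x) :: pySetDirection rest v

-- A's if/elif chain, step for step (no final else: an unmatched d would stay unchanged).
def stepA (d i : String) : String :=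
  if d == "N" then (if i == "R" then "E" else "W")
  else if d == "E" then (if i == "R" then "S" else "N")
  else if d == "S" then (if i == "R" then "W" else "E")
  else if d == "W" then (if i == "R" then "N" else "S")
  else d

def loopA (turn : List String) (d : String) : List String :=
  match turn with
  | [] => []
  | i :: rest => let d' := stepA d i; d' :: loopA rest d'

def FindDirection (data : List (String × List String)) : List (String × List String) :=
  -- data["turn"]: first-match lookup; KeyError (none) is excluded by Pre_FindDirection
  pySetDirection data (loopA ((data.lookup "turn").getD []) "N")

-- ===== PORT B =====
-- Stage 1: cumulative signed turn counts (R=+1, else -1).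
def prefixB (turn : List String) (total : Int) : List Int :=
  match turn with
  | [] => []
  | t :: rest =>
      let total' := total + (if t == "R" then 1 else -1)
      total' :: prefixB rest total'

-- Stage 2 decoder: "NESW"[p % 4]; p % 4 is always in 0..3, so .getD "" only totalizes.
def decodeB (p : Int) : String :=
  match PySem.Str.pyGet? "NESW" (PySem.Int.mod p 4) with
  | some c => String.ofList [c]
  | none => ""

def FindDirection_alt (data : List (String × List String)) : List (String × List String) :=
  pySetDirection data ((prefixB ((data.lookup "turn").getD []) 0).map decodeB)

-- ===== PRECONDITION & SPEC =====
-- Pre_ excludes exactly the inputs with no "turn" key, on which Python A raises KeyError.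
def Pre_FindDirection (data : List (String × List String)) : Prop :=
  (data.lookup "turn").isSome = true
instance (data : List (String × List String)) : Decidable (Pre_FindDirection data) := by
  unfold Pre_FindDirection; infer_instance

def pvWitness_FindDirection : (List (String × List String)) := [("turn", ["R", "L", "R"])]

def Spec_FindDirection (data : List (String × List String)) (out : List (String × List String)) : Prop := out = FindDirection_alt data
instance (data : List (String × List String)) (out : List (String × List String)) : Decidable (Spec_FindDirection data out) := by unfold Spec_FindDirection; infer_instance

-- ===== CLAIM =====
def Claim_equal_FindDirection : Prop := ∀ (data : List (String × List String)), Dom_FindDirection data → Pre_FindDirection data → Spec_FindDirection data (FindDirection data)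

-- ===== LEMMAS AND PROOFS =====

-- One A-step from the decoded heading equals decoding after one more signed turn.
theorem mod4_eq (a : Int) : PySem.Int.mod a 4 = a % 4 :=
  PySem.Int.mod_eq_emod_of_pos (by omega)

theorem step_decode (c : Int) (i : String) :
    stepA (decodeB c) i = decodeB (c + (if i == "R" then 1 else -1)) := by
  have hr : c % 4 = 0 ∨ c % 4 = 1 ∨ c % 4 = 2 ∨ c % 4 = 3 := by omega
  by_cases hi : i == "R" <;>
    rcases hr with hr | hr | hr | hr <;>
      [ (have h4' : (c + 1) % 4 = 1 := by omega);
        (have h4' : (c + 1) % 4 = 2 := by omega);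
        (have h4' : (c + 1) % 4 = 3 := by omega);
        (have h4' : (c + 1) % 4 = 0 := by omega);
        (have h4' : (c + -1) % 4 = 3 := by omega);
        (have h4' : (c + -1) % 4 = 0 := by omega);
        (have h4' : (c + -1) % 4 = 1 := by omega);
        (have h4' : (c + -1) % 4 = 2 := by omega) ] <;>
      simp [decodeB, stepA, hi, mod4_eq, hr, h4',
            PySem.List.pyGet?, PySem.List.pyIdx?]

-- The state-machine loop from a decoded heading equals decoding the prefix sums.
theorem loopA_eq_prefix (turn : List String) (c : Int) :
    loopA turn (decodeB c) = (prefixB turn c).map decodeB := by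
  induction turn generalizing c with
  | nil => simp [loopA, prefixB]
  | cons i rest ih =>
      simp [loopA, prefixB, step_decode, ih]

-- ===== VERDICT =====
theorem FindDirection_spec : Claim_equal_FindDirection := by
  intro data _ _
  unfold Spec_FindDirection FindDirection FindDirection_alt
  have h := loopA_eq_prefix ((data.lookup "turn").getD []) 0
  rw [show decodeB 0 = "N" from by decide] at h
  rw [h]
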